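-- pv_equiv track=rewrite | github.com/pkrajanand/TransformTree | transformTree.py | build_groups_to_nodes_tree
-- ===== SOURCE A (Python) =====
-- def build_groups_to_nodes_tree(nodes):
--     _groups_to_nodes_tree = {}
--     for node_name, node_details in nodes.items():
--         for _group_name in node_details['groups']:
--             if _group_name in _groups_to_nodes_tree:
--                 _groups_to_nodes_tree[_group_name]["hosts"].append(node_name)
--             else:
--                 _groups_to_nodes_tree[_group_name] = {"hosts": [node_name]}
--     return _groups_to_nodes_tree
-- ===== SOURCE B (Python) =====
-- def build_groups_to_nodes_tree(nodes):
--     # Pass 1: group names in order of first appearance.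
--     order = []
--     for details in nodes.values():
--         for g in details['groups']:
--             if g not in order:
--                 order.append(g)
--     # Pass 2: for each group, rescan the nodes collecting its hosts.
--     return {g: {"hosts": [n for n, d in nodes.items() for gg in d['groups'] if gg == g]}
--             for g in order}
-- ===== Notes on version B (the rewrite author's own statement) =====
-- stated objective: alternative
-- what changed: Replaces A's single interleaved dict build (update-or-insert per group mention) with two separate passes: first collect the group names in order of first appearance, then for each group rescan the nodes to collect its host list by filtering.
import Mathlib
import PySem

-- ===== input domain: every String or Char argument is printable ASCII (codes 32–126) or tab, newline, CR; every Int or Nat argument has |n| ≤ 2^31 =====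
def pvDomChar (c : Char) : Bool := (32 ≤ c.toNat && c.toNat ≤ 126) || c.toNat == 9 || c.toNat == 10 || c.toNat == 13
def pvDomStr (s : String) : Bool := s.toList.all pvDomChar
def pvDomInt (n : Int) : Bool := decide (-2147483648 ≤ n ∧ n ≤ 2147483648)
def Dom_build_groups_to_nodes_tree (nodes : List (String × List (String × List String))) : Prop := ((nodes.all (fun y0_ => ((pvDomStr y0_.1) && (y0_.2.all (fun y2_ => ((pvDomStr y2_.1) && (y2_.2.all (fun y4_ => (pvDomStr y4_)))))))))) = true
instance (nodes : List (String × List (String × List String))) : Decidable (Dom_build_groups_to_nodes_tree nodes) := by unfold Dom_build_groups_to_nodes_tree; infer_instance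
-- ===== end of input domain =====

-- B replaces the interleaved update-or-insert dict build by two passes: group order first, then a per-group rescan for hosts (objective: alternative, not faster).

-- ===== PORT A =====
-- state: dict group_name -> {"hosts": [...]}; returned as its item list per the type convention
def build_groups_to_nodes_tree (nodes : List (String × List (String × List String))) : List (String × List (String × List String)) :=
  ((nodes.foldl (fun acc p =>
      ((PySem.Dict.mk p.2).getD "groups" []).foldl (fun acc2 g =>
        if acc2.contains g then
          acc2.modify g (PySem.Dict.mk []) (fun inner => inner.modify "hosts" [] (fun hs => hs ++ [p.1]))
        else
          acc2.insert g (PySem.Dict.mk [("hosts", [p.1])]))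
      acc)
    PySem.Dict.empty).items).map (fun q => (q.1, q.2.items))

-- ===== PORT B =====
-- node_details['groups']  (total form; Pre_ guarantees the key is present)
def pvGroupsOf (nd : List (String × List String)) : List String :=
  (PySem.Dict.mk nd).getD "groups" []

def build_groups_to_nodes_tree_alt (nodes : List (String × List (String × List String))) : List (String × List (String × List String)) :=
  (nodes.foldl (fun ord p =>
      (pvGroupsOf p.2).foldl (fun ord2 g => if g ∈ ord2 then ord2 else ord2 ++ [g]) ord) []).map
    (fun g => (g, [("hosts",
      nodes.flatMap (fun p => ((pvGroupsOf p.2).filter (fun gg => gg == g)).map (fun _ => p.1)))]))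

-- ===== PRECONDITION & SPEC =====
-- Pre_: every node_details dict has the key "groups"; otherwise Python A (and B) raises KeyError.
def Pre_build_groups_to_nodes_tree (nodes : List (String × List (String × List String))) : Prop :=
  ∀ p ∈ nodes, "groups" ∈ p.2.map Prod.fst
instance (nodes : List (String × List (String × List String))) : Decidable (Pre_build_groups_to_nodes_tree nodes) := by unfold Pre_build_groups_to_nodes_tree; infer_instance
def pvWitness_build_groups_to_nodes_tree : (List (String × List (String × List String))) :=
  [("n1", [("groups", ["g1", "g2"])]), ("n2", [("groups", ["g1"])])]

def Spec_build_groups_to_nodes_tree (nodes : List (String × List (String × List String))) (out : List (String × List (String × List String))) : Prop := out = build_groups_to_nodes_tree_alt nodes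
instance (nodes : List (String × List (String × List String))) (out : List (String × List (String × List String))) : Decidable (Spec_build_groups_to_nodes_tree nodes out) := by unfold Spec_build_groups_to_nodes_tree; infer_instance

-- ===== CLAIM (what is proved, stated in full; the proofs are below) =====
def Claim_equal_build_groups_to_nodes_tree : Prop := ∀ (nodes : List (String × List (String × List String))), Dom_build_groups_to_nodes_tree nodes → Pre_build_groups_to_nodes_tree nodes → Spec_build_groups_to_nodes_tree nodes (build_groups_to_nodes_tree nodes)

-- ===== LEMMAS AND PROOFS =====

-- the flattened stream of (group, host) mentions, and helpers characterising both folds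
def pvPairs (nodes : List (String × List (String × List String))) : List (String × String) :=
  nodes.flatMap (fun p => (pvGroupsOf p.2).map (fun g => (g, p.1)))

def pvVals (ps : List (String × String)) (g : String) : List String :=
  (ps.filter (fun q => q.1 == g)).map Prod.snd

def pvHostsD (s : List (String × List String)) (g : String) : List String :=
  ((s.find? (fun e => e.1 == g)).map Prod.snd).getD []

def pvAStep (acc : PySem.Dict String (PySem.Dict String (List String))) (p : String × String) :
    PySem.Dict String (PySem.Dict String (List String)) :=
  if acc.contains p.1 then
    acc.modify p.1 (PySem.Dict.mk []) (fun inner => inner.modify "hosts" [] (fun hs => hs ++ [p.2]))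
  else
    acc.insert p.1 (PySem.Dict.mk [("hosts", [p.2])])

def pvLStep (s : List (String × List String)) (p : String × String) : List (String × List String) :=
  if p.1 ∈ s.map Prod.fst then s.map (fun e => if e.1 == p.1 then (e.1, e.2 ++ [p.2]) else e)
  else s ++ [(p.1, [p.2])]

def pvKStep (ks : List String) (g : String) : List String :=
  if g ∈ ks then ks else ks ++ [g]

def pvAbs (s : List (String × List String)) : PySem.Dict String (PySem.Dict String (List String)) :=
  PySem.Dict.mk (s.map (fun e => (e.1, PySem.Dict.mk [("hosts", e.2)])))

lemma pv_keys_lstep (s : List (String × List String)) (p : String × String) :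
    (pvLStep s p).map Prod.fst = pvKStep (s.map Prod.fst) p.1 := by
  unfold pvLStep pvKStep
  split_ifs with h
  · rw [List.map_map]
    apply List.map_congr_left
    intro e _
    by_cases he : e.1 = p.1 <;> simp [he]
  · simp

lemma pv_nodup_lstep (s : List (String × List String)) (p : String × String)
    (h : (s.map Prod.fst).Nodup) : ((pvLStep s p).map Prod.fst).Nodup := by
  rw [pv_keys_lstep]; unfold pvKStep
  split_ifs with hm
  · exact h
  · simp only [List.nodup_append, h, true_and]
    refine ⟨List.nodup_singleton _, ?_⟩
    intro a ha b hb
    simp only [List.mem_singleton] at hb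
    subst hb
    exact fun hab => hm (hab ▸ ha)

lemma pv_contains_abs (s : List (String × List String)) (g : String) :
    (pvAbs s).contains g = true ↔ g ∈ s.map Prod.fst := by
  simp [pvAbs, PySem.Dict.contains, List.any_eq_true, List.mem_map]

lemma pv_contains_abs_false (s : List (String × List String)) (g : String)
    (hm : g ∉ s.map Prod.fst) : (pvAbs s).contains g = false := by
  rw [← Bool.not_eq_true, pv_contains_abs]
  exact hm

lemma pv_find_key (s : List (String × List String)) (g : String) (hm : g ∈ s.map Prod.fst) :
    ∃ hs, s.find? (fun e => e.1 == g) = some (g, hs) := by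
  induction s with
  | nil => simp at hm
  | cons e t ih =>
    by_cases he : e.1 = g
    · exact ⟨e.2, by cases e; simp_all⟩
    · have hm' : g ∈ t.map Prod.fst := by
        rcases List.mem_cons.1 hm with h | h
        · exact absurd h.symm he
        · exact h
      obtain ⟨hs, hhs⟩ := ih hm'
      have hbe : (e.1 == g) = false := by simp [he]
      exact ⟨hs, by simp [hbe, hhs]⟩

lemma pv_sim (s : List (String × List String)) (p : String × String)
    (h : (s.map Prod.fst).Nodup) : pvAStep (pvAbs s) p = pvAbs (pvLStep s p) := by
  unfold pvAStep pvLStep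
  by_cases hm : p.1 ∈ s.map Prod.fst
  · rw [if_pos ((pv_contains_abs s p.1).2 hm), if_pos hm]
    obtain ⟨hs, hhs⟩ := pv_find_key s p.1 hm
    have hmem : (p.1, hs) ∈ s := List.mem_of_find?_eq_some hhs
    have hgetD : (pvAbs s).getD p.1 (PySem.Dict.mk []) = PySem.Dict.mk [("hosts", hs)] := by
      simp [pvAbs, PySem.Dict.getD, PySem.Dict.get?, List.find?_map, Function.comp_def, hhs]
    rw [PySem.Dict.modify, hgetD]
    have hinner : (PySem.Dict.mk [("hosts", hs)]).modify "hosts" [] (fun l => l ++ [p.2])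
        = PySem.Dict.mk [("hosts", hs ++ [p.2])] := by
      simp [PySem.Dict.modify, PySem.Dict.insert, PySem.Dict.getD, PySem.Dict.get?,
        PySem.Dict.contains]
    rw [hinner, PySem.Dict.insert, if_pos (by simp [pv_contains_abs, hm])]
    show PySem.Dict.mk _ = PySem.Dict.mk _
    congr 1
    simp only [pvAbs, List.map_map]
    apply List.map_congr_left
    intro e he
    by_cases hk : e.1 = p.1
    · have : e = (p.1, hs) := List.inj_on_of_nodup_map h he hmem (by simpa using hk)
      simp [this]
    · simp [hk]
  · have hc : (pvAbs s).contains p.1 = false := pv_contains_abs_false s p.1 hm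
    rw [if_neg (by simp [hc]), if_neg hm]
    rw [PySem.Dict.insert, if_neg (by simp [hc])]
    simp [pvAbs]

lemma pv_fold_sim (ps : List (String × String)) (s : List (String × List String))
    (h : (s.map Prod.fst).Nodup) :
    ps.foldl pvAStep (pvAbs s) = pvAbs (ps.foldl pvLStep s) := by
  induction ps generalizing s with
  | nil => rfl
  | cons p ps ih =>
    rw [List.foldl_cons, List.foldl_cons, pv_sim s p h, ih _ (pv_nodup_lstep s p h)]

lemma pv_vals_cons (p : String × String) (ps : List (String × String)) (g : String) :
    pvVals (p :: ps) g = (if p.1 = g then [p.2] else []) ++ pvVals ps g := by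
  by_cases hp : p.1 = g <;> simp [pvVals, hp]

lemma pv_find_self (s : List (String × List String)) (e : String × List String)
    (hnd : (s.map Prod.fst).Nodup) (he : e ∈ s) :
    s.find? (fun x => x.1 == e.1) = some e := by
  obtain ⟨hs, hhs⟩ := pv_find_key s e.1 (List.mem_map.2 ⟨e, he, rfl⟩)
  have hmem : (e.1, hs) ∈ s := List.mem_of_find?_eq_some hhs
  have : e = (e.1, hs) := List.inj_on_of_nodup_map hnd he hmem (by simp)
  rw [hhs, ← this]

lemma pv_hostsD_lstep_pos (s : List (String × List String)) (p : String × String)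
    (hm : p.1 ∈ s.map Prod.fst) (g : String) :
    pvHostsD (pvLStep s p) g
      = if g = p.1 then pvHostsD s p.1 ++ [p.2] else pvHostsD s g := by
  unfold pvLStep pvHostsD
  rw [if_pos hm, List.find?_map]
  have hcomp : ((fun e => e.1 == g) ∘ fun e =>
      if e.1 == p.1 then (e.1, e.2 ++ [p.2]) else e) = fun e : String × List String => e.1 == g := by
    funext e
    by_cases he : e.1 = p.1 <;> simp [he]
  rw [hcomp]
  by_cases hg : g = p.1
  · subst hg
    obtain ⟨hs, hhs⟩ := pv_find_key s p.1 hm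
    simp [hhs]
  · rw [if_neg hg]
    cases hf : s.find? (fun e => e.1 == g) with
    | none => simp
    | some e =>
      have : e.1 = g := by simpa using List.find?_some hf
      simp [this, hg]

lemma pv_hostsD_not_mem (s : List (String × List String)) (g : String)
    (hm : g ∉ s.map Prod.fst) : pvHostsD s g = [] := by
  unfold pvHostsD
  have : s.find? (fun e => e.1 == g) = none := by
    rw [List.find?_eq_none]
    intro e he hbe
    exact hm (List.mem_map.2 ⟨e, he, by simpa using hbe⟩)
  simp [this]

lemma pv_hostsD_append_new (s : List (String × List String)) (p : String × String)
    (hm : p.1 ∉ s.map Prod.fst) (g : String) :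
    pvHostsD (s ++ [(p.1, [p.2])]) g
      = if g = p.1 then [p.2] else pvHostsD s g := by
  unfold pvHostsD
  rw [List.find?_append]
  by_cases hg : g = p.1
  · subst hg
    have : s.find? (fun e => e.1 == p.1) = none := by
      rw [List.find?_eq_none]
      intro e he hbe
      exact hm (List.mem_map.2 ⟨e, he, by simpa using hbe⟩)
    simp [this]
  · cases s.find? (fun e => e.1 == g) with
    | none => simp [Ne.symm hg, hg]
    | some e => simp [hg]

lemma pv_grand (ps : List (String × String)) (s : List (String × List String))
    (hnd : (s.map Prod.fst).Nodup) :
    ps.foldl pvLStep s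
      = (ps.foldl (fun ks p => pvKStep ks p.1) (s.map Prod.fst)).map
          (fun g => (g, pvHostsD s g ++ pvVals ps g)) := by
  induction ps generalizing s with
  | nil =>
    simp only [List.foldl_nil, List.map_map]
    nth_rewrite 1 [show s = s.map id from (List.map_id s).symm]
    apply List.map_congr_left
    intro e he
    have hfs := pv_find_self s e hnd he
    simp [pvHostsD, pvVals, hfs]
  | cons p ps ih =>
    rw [List.foldl_cons, List.foldl_cons, ih (pvLStep s p) (pv_nodup_lstep s p hnd),
      pv_keys_lstep]
    congr 1
    funext g
    rw [pv_vals_cons]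
    by_cases hm : p.1 ∈ s.map Prod.fst
    · rw [pv_hostsD_lstep_pos s p hm g]
      by_cases hg : g = p.1
      · subst hg; simp
      · rw [if_neg hg, if_neg (fun h : p.1 = g => hg h.symm)]; simp
    · have hl : pvLStep s p = s ++ [(p.1, [p.2])] := by unfold pvLStep; rw [if_neg hm]
      rw [hl, pv_hostsD_append_new s p hm g]
      by_cases hg : g = p.1
      · subst hg; rw [if_pos rfl, if_pos rfl, pv_hostsD_not_mem s _ hm]; simp
      · rw [if_neg hg, if_neg (fun h : p.1 = g => hg h.symm)]; simp

lemma pv_flattenA (nodes : List (String × List (String × List String)))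
    (d : PySem.Dict String (PySem.Dict String (List String))) :
    nodes.foldl (fun acc p =>
      ((PySem.Dict.mk p.2).getD "groups" []).foldl (fun acc2 g =>
        if acc2.contains g then
          acc2.modify g (PySem.Dict.mk []) (fun inner => inner.modify "hosts" [] (fun hs => hs ++ [p.1]))
        else
          acc2.insert g (PySem.Dict.mk [("hosts", [p.1])]))
      acc) d
    = (pvPairs nodes).foldl pvAStep d := by
  induction nodes generalizing d with
  | nil => rfl
  | cons p t ih =>
    rw [List.foldl_cons]
    rw [ih]
    show _ = (pvPairs (p :: t)).foldl pvAStep d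
    have : pvPairs (p :: t) = (pvGroupsOf p.2).map (fun g => (g, p.1)) ++ pvPairs t := by
      simp [pvPairs]
    rw [this, List.foldl_append, List.foldl_map]
    rfl

lemma pv_flattenK (nodes : List (String × List (String × List String))) (ks : List String) :
    nodes.foldl (fun ord p =>
      (pvGroupsOf p.2).foldl (fun ord2 g => if g ∈ ord2 then ord2 else ord2 ++ [g]) ord) ks
    = (pvPairs nodes).foldl (fun ks p => pvKStep ks p.1) ks := by
  induction nodes generalizing ks with
  | nil => rfl
  | cons p t ih =>
    rw [List.foldl_cons, ih]
    have : pvPairs (p :: t) = (pvGroupsOf p.2).map (fun g => (g, p.1)) ++ pvPairs t := by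
      simp [pvPairs]
    rw [this, List.foldl_append, List.foldl_map]
    rfl

lemma pv_vals_pairs (nodes : List (String × List (String × List String))) (g : String) :
    nodes.flatMap (fun p => ((pvGroupsOf p.2).filter (fun gg => gg == g)).map (fun _ => p.1))
    = pvVals (pvPairs nodes) g := by
  induction nodes with
  | nil => rfl
  | cons p t ih =>
    have : pvPairs (p :: t) = (pvGroupsOf p.2).map (fun g => (g, p.1)) ++ pvPairs t := by
      simp [pvPairs]
    rw [List.flatMap_cons, ih, this]
    unfold pvVals
    rw [List.filter_append, List.map_append]
    congr 1
    rw [List.filter_map, List.map_map]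
    rfl

-- ===== VERDICT (by name: the statement is the Claim_ definition above) =====
theorem build_groups_to_nodes_tree_spec : Claim_equal_build_groups_to_nodes_tree := by
  intro nodes _ _
  unfold Spec_build_groups_to_nodes_tree build_groups_to_nodes_tree build_groups_to_nodes_tree_alt
  rw [pv_flattenA, pv_flattenK]
  rw [show (PySem.Dict.empty : PySem.Dict String (PySem.Dict String (List String))) = pvAbs []
    from rfl]
  rw [pv_fold_sim _ _ (by simp), pv_grand _ _ (by simp)]
  simp only [pvAbs, List.map_map, pv_vals_pairs]
  apply List.map_congr_left
  intro g _
  simp [Function.comp_def, pvHostsD]
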